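-- pv_equiv track=rewrite | github.com/shan18/CapsNet-COCO | create_dataset.py | map_image_to_supercategories
-- ===== SOURCE A (Python) =====
-- def map_image_to_supercategories(supercategories, supercategory_to_img, supercategory_ids):
--     """
--     key: image id
--     value: one-hot vector of supercategories present in the image
--     """
--     image_to_supercategories = {}
--     for supercategory, img_ids in supercategory_to_img.items():
--         for img_id in img_ids:
--             if img_id in image_to_supercategories:
--                 image_to_supercategories[img_id][supercategory_ids[supercategory]] = 1
--             else:
--                 one_hot = [0] * len(supercategories)
--                 one_hot[supercategory_ids[supercategory]] = 1
--                 image_to_supercategories[img_id] = one_hot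
--     return image_to_supercategories
-- ===== SOURCE B (Python) =====
-- def map_image_to_supercategories(supercategories, supercategory_to_img, supercategory_ids):
--     """
--     key: image id
--     value: one-hot vector of supercategories present in the image
--     """
--     # pass 1: per image, collect the set of supercategory indices present in it
--     img_to_idxs = {}
--     for supercategory, img_ids in supercategory_to_img.items():
--         for img_id in img_ids:
--             img_to_idxs.setdefault(img_id, set()).add(supercategory_ids[supercategory])
--     # pass 2: materialise each index set as a one-hot vector
--     n = len(supercategories)
--     image_to_supercategories = {}
--     for img_id, idxs in img_to_idxs.items():
--         one_hot = [0] * n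
--         for i in idxs:
--             one_hot[i] = 1
--         image_to_supercategories[img_id] = one_hot
--     return image_to_supercategories
-- ===== Notes on version B (the rewrite author's own statement) =====
-- stated objective: alternative
-- what changed: Replaces A's single pass that scatter-writes a 1 per (supercategory, image) occurrence into lazily allocated zero vectors by two passes: first build a dict mapping each image id to the set of supercategory indices present in it, then materialise each index set as a one-hot vector.
import Mathlib
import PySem

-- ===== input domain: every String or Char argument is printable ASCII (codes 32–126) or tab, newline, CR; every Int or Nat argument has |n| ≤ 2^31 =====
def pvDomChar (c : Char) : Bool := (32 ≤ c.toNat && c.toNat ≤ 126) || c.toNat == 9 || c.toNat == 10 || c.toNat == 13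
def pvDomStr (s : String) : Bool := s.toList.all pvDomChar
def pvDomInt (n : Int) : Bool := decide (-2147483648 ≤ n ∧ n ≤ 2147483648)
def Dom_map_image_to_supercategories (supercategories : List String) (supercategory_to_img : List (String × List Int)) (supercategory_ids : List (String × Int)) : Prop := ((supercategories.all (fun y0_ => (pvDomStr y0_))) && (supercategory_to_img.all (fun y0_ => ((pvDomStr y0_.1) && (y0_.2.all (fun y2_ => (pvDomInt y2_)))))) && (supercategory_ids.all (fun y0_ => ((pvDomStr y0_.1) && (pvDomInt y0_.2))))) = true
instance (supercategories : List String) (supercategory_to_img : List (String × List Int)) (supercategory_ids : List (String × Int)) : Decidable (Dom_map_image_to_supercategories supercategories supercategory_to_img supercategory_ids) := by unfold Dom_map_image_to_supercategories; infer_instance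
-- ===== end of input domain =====

-- ===== PORT A =====
-- B: same value via a different decomposition — one pass collecting per-image index sets, then a one-hot
-- materialisation pass — instead of A's single pass scatter-writing into lazily allocated zero vectors.
-- A-side helper: the body of A's inner loop (lazily allocate the zero vector, then one_hot[idx] = 1).
def pvStepA (n : Nat) (idx : Int) (d : PySem.Dict Int (List Int)) (img_id : Int) : PySem.Dict Int (List Int) :=
  match d.get? img_id with
  | some one_hot => d.insert img_id (PySem.List.pySetD one_hot idx 1)
  | none => d.insert img_id (PySem.List.pySetD (List.replicate n 0) idx 1)

-- 'supercategory_ids[supercategory]' is ported as getD … 0; Pre_ guarantees the key is present and the index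
-- in range wherever the write happens, so the defaults are never reached on admitted inputs.
def map_image_to_supercategories (supercategories : List String) (supercategory_to_img : List (String × List Int)) (supercategory_ids : List (String × Int)) : List (Int × List Int) :=
  (supercategory_to_img.foldl
    (fun d p => p.2.foldl (pvStepA supercategories.length ((PySem.Dict.ofList supercategory_ids).getD p.1 0)) d)
    (PySem.Dict.empty : PySem.Dict Int (List Int))).items

-- ===== PORT B =====
-- B-side helper: img_to_idxs.setdefault(img_id, set()).add(idx)  (insert-or-create, then grow the set in place)
def pvStepB (idx : Int) (d : PySem.Dict Int (PySem.Set Int)) (img_id : Int) : PySem.Dict Int (PySem.Set Int) :=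
  d.modify img_id PySem.Set.empty (fun s => PySem.Set.add s idx)

def map_image_to_supercategories_alt (supercategories : List String) (supercategory_to_img : List (String × List Int)) (supercategory_ids : List (String × Int)) : List (Int × List Int) :=
  let img_to_idxs : PySem.Dict Int (PySem.Set Int) :=
    supercategory_to_img.foldl
      (fun d p => p.2.foldl (pvStepB ((PySem.Dict.ofList supercategory_ids).getD p.1 0)) d)
      PySem.Dict.empty
  img_to_idxs.items.map
    (fun q => (q.1, q.2.foldl (fun one_hot i => PySem.List.pySetD one_hot i 1) (List.replicate supercategories.length 0)))

-- ===== PRECONDITION & SPEC =====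
-- Pre_ excludes (a) association lists for the dict parameter supercategory_to_img with duplicate keys (they do not
-- represent a Python dict, whose collapsed items A iterates) and (b) inputs where Python A raises: a supercategory
-- with a nonempty image list whose name is missing from supercategory_ids (KeyError) or whose id is out of range
-- for the one-hot vector (IndexError).
def Pre_map_image_to_supercategories (supercategories : List String) (supercategory_to_img : List (String × List Int)) (supercategory_ids : List (String × Int)) : Prop :=
  (supercategory_to_img.map Prod.fst).Nodup ∧
  ∀ p ∈ supercategory_to_img, p.2 ≠ [] →
    ((PySem.Dict.ofList supercategory_ids).get? p.1).isSome = true ∧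
    PySem.Raise.InRange supercategories.length (((PySem.Dict.ofList supercategory_ids).get? p.1).getD 0)

instance (supercategories : List String) (supercategory_to_img : List (String × List Int)) (supercategory_ids : List (String × Int)) : Decidable (Pre_map_image_to_supercategories supercategories supercategory_to_img supercategory_ids) := by unfold Pre_map_image_to_supercategories; infer_instance

def pvWitness_map_image_to_supercategories : List String × (List (String × List Int)) × (List (String × Int)) :=
  (["animal", "food"], [("animal", [7, 2]), ("food", [2])], [("animal", 0), ("food", 1)])

def Spec_map_image_to_supercategories (supercategories : List String) (supercategory_to_img : List (String × List Int)) (supercategory_ids : List (String × Int)) (out : List (Int × List Int)) : Prop := out = map_image_to_supercategories_alt supercategories supercategory_to_img supercategory_ids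
instance (supercategories : List String) (supercategory_to_img : List (String × List Int)) (supercategory_ids : List (String × Int)) (out : List (Int × List Int)) : Decidable (Spec_map_image_to_supercategories supercategories supercategory_to_img supercategory_ids out) := by unfold Spec_map_image_to_supercategories; infer_instance

-- ===== CLAIM (what is proved, stated in full; the proofs are below) =====
def Claim_equal_map_image_to_supercategories : Prop := ∀ (supercategories : List String) (supercategory_to_img : List (String × List Int)) (supercategory_ids : List (String × Int)), Dom_map_image_to_supercategories supercategories supercategory_to_img supercategory_ids → Pre_map_image_to_supercategories supercategories supercategory_to_img supercategory_ids → Spec_map_image_to_supercategories supercategories supercategory_to_img supercategory_ids (map_image_to_supercategories supercategories supercategory_to_img supercategory_ids)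

-- ===== LEMMAS AND PROOFS =====

-- The one-hot vector B materialises from an index set: scatter 1s into a zero vector.
def pvScatter (n : Nat) (s : List Int) : List Int :=
  s.foldl (fun one_hot i => PySem.List.pySetD one_hot i 1) (List.replicate n 0)

lemma pv_setD_setD_self (z : List Int) (i : Int) :
    PySem.List.pySetD (PySem.List.pySetD z i 1) i 1 = PySem.List.pySetD z i 1 := by
  unfold PySem.List.pySetD PySem.List.pySet?
  cases h : PySem.List.pyIdx? z.length i with
  | none => simp [h]
  | some j => simp [h, List.set_set]

lemma pv_setD_comm (z : List Int) (i k : Int) :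
    PySem.List.pySetD (PySem.List.pySetD z i 1) k 1 = PySem.List.pySetD (PySem.List.pySetD z k 1) i 1 := by
  unfold PySem.List.pySetD PySem.List.pySet?
  cases hi : PySem.List.pyIdx? z.length i with
  | none =>
    cases hk : PySem.List.pyIdx? z.length k with
    | none => simp [hi, hk]
    | some j => simp [hi, hk]
  | some j =>
    cases hk : PySem.List.pyIdx? z.length k with
    | none => simp [hi, hk]
    | some j' =>
      by_cases hjj : j = j'
      · subst hjj; simp [hi, hk, List.set_set]
      · simp only [hi, hk, Option.map_some, Option.getD_some, List.length_set]
        exact List.set_comm _ _ hjj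

lemma pv_write_again (t : List Int) (z : List Int) (idx : Int) :
    PySem.List.pySetD (t.foldl (fun v i => PySem.List.pySetD v i 1) (PySem.List.pySetD z idx 1)) idx 1
      = t.foldl (fun v i => PySem.List.pySetD v i 1) (PySem.List.pySetD z idx 1) := by
  induction t generalizing z with
  | nil => exact pv_setD_setD_self z idx
  | cons b t ih =>
    simp only [List.foldl_cons]
    rw [pv_setD_comm z idx b]
    exact ih (PySem.List.pySetD z b 1)

lemma pv_write_mem (l : List Int) (z : List Int) (idx : Int) (h : idx ∈ l) :
    PySem.List.pySetD (l.foldl (fun v i => PySem.List.pySetD v i 1) z) idx 1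
      = l.foldl (fun v i => PySem.List.pySetD v i 1) z := by
  induction l generalizing z with
  | nil => cases h
  | cons a t ih =>
    simp only [List.foldl_cons]
    by_cases ht : idx ∈ t
    · exact ih (PySem.List.pySetD z a 1) ht
    · have ha : idx = a := by
        rcases List.mem_cons.mp h with h1 | h2
        · exact h1
        · exact absurd h2 ht
      subst ha
      exact pv_write_again t z idx

-- writing a freshly added index into the materialised vector = materialising the grown set
lemma pv_scatter_add (n : Nat) (s : PySem.Set Int) (idx : Int) :
    pvScatter n (PySem.Set.add s idx) = PySem.List.pySetD (pvScatter n s) idx 1 := by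
  unfold PySem.Set.add
  by_cases h : PySem.Set.contains s idx = true
  · have hm : idx ∈ s := by simpa [PySem.Set.contains] using h
    rw [if_pos h]
    exact (pv_write_mem s _ idx hm).symm
  · rw [if_neg h]
    unfold pvScatter
    rw [List.foldl_append]
    simp

lemma pv_stepA_nodup (n : Nat) (idx : Int) (img : Int) (dA : PySem.Dict Int (List Int))
    (h : dA.keys.Nodup) : (pvStepA n idx dA img).keys.Nodup := by
  unfold pvStepA
  cases hg : dA.get? img with
  | none => exact PySem.Dict.nodup_keys_insert _ _ _ h
  | some v => exact PySem.Dict.nodup_keys_insert _ _ _ h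

-- one inner-loop step preserves the simulation relation between A's dict of vectors and B's dict of index sets
lemma pv_step (n : Nat) (idx : Int) (img : Int) (dA : PySem.Dict Int (List Int)) (dB : PySem.Dict Int (PySem.Set Int))
    (hnd : dA.keys.Nodup)
    (h : dA.items = dB.items.map (fun q => (q.1, pvScatter n q.2))) :
    (pvStepA n idx dA img).items = (pvStepB idx dB img).items.map (fun q => (q.1, pvScatter n q.2)) := by
  have hkeys : dA.keys = dB.keys := by
    simp only [PySem.Dict.keys, h, List.map_map]
    rfl
  have hcont : dA.contains img = dB.contains img := by
    rw [PySem.Dict.contains_eq_decide_mem_keys, PySem.Dict.contains_eq_decide_mem_keys, hkeys]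
  unfold pvStepA pvStepB PySem.Dict.modify
  by_cases hc : dB.contains img = true
  · have hsome : (dB.get? img).isSome = true := by
      rw [← PySem.Dict.contains_eq_isSome_get?]; exact hc
    obtain ⟨s, hs⟩ := Option.isSome_iff_exists.mp hsome
    have hmemB : (img, s) ∈ dB.items := PySem.Dict.mem_items_of_get?_eq_some _ hs
    have hmemA : (img, pvScatter n s) ∈ dA.items := by
      rw [h]; exact List.mem_map_of_mem hmemB
    have hgA : dA.get? img = some (pvScatter n s) := PySem.Dict.get?_of_mem_items _ hmemA hnd
    have hcA : dA.contains img = true := by rw [hcont]; exact hc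
    rw [hgA]
    have hgetD : dB.getD img PySem.Set.empty = s := by
      simp [PySem.Dict.getD_eq_get?_getD, hs]
    rw [PySem.Dict.items_insert_of_contains _ _ hcA,
        PySem.Dict.items_insert_of_contains _ _ hc, h, List.map_map, List.map_map]
    apply List.map_congr_left
    intro p _
    by_cases hp : p.1 = img
    · simp only [Function.comp_apply, hp, BEq.rfl, if_pos, hgetD]
      simp [pv_scatter_add n s idx]
    · simp [hp]
  · have hcB : dB.contains img = false := by simpa using hc
    have hcAf : dA.contains img = false := by rw [hcont]; exact hcB
    have hgA : dA.get? img = none := by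
      rw [PySem.Dict.get?_eq_none_iff_contains]; exact hcAf
    rw [hgA]
    rw [PySem.Dict.items_insert_of_not_contains _ _ hcAf,
        PySem.Dict.items_insert_of_not_contains _ _ hcB, h, List.map_append]
    congr 1
    have hgB : dB.get? img = none := by
      rw [PySem.Dict.get?_eq_none_iff_contains]; exact hcB
    simp [PySem.Dict.getD_eq_get?_getD, hgB, PySem.Set.add, PySem.Set.contains,
      PySem.Set.empty, pvScatter]

-- the inner loop (over one supercategory's image list) preserves the relation
lemma pv_fold_inner (n : Nat) (idx : Int) (imgs : List Int)
    (dA : PySem.Dict Int (List Int)) (dB : PySem.Dict Int (PySem.Set Int))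
    (hnd : dA.keys.Nodup)
    (h : dA.items = dB.items.map (fun q => (q.1, pvScatter n q.2))) :
    (imgs.foldl (pvStepA n idx) dA).keys.Nodup ∧
    (imgs.foldl (pvStepA n idx) dA).items
      = (imgs.foldl (pvStepB idx) dB).items.map (fun q => (q.1, pvScatter n q.2)) := by
  induction imgs generalizing dA dB with
  | nil => exact ⟨hnd, h⟩
  | cons a t ih =>
    simp only [List.foldl_cons]
    exact ih _ _ (pv_stepA_nodup n idx a dA hnd) (pv_step n idx a dA dB hnd h)

-- the outer loop (over the supercategory → image-list pairs) preserves the relation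
lemma pv_fold_outer (n : Nat) (si : List (String × Int)) (pairs : List (String × List Int))
    (dA : PySem.Dict Int (List Int)) (dB : PySem.Dict Int (PySem.Set Int))
    (hnd : dA.keys.Nodup)
    (h : dA.items = dB.items.map (fun q => (q.1, pvScatter n q.2))) :
    (pairs.foldl (fun d p => p.2.foldl (pvStepA n ((PySem.Dict.ofList si).getD p.1 0)) d) dA).keys.Nodup ∧
    (pairs.foldl (fun d p => p.2.foldl (pvStepA n ((PySem.Dict.ofList si).getD p.1 0)) d) dA).items
      = (pairs.foldl (fun d p => p.2.foldl (pvStepB ((PySem.Dict.ofList si).getD p.1 0)) d) dB).items.map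
          (fun q => (q.1, pvScatter n q.2)) := by
  induction pairs generalizing dA dB with
  | nil => exact ⟨hnd, h⟩
  | cons p t ih =>
    simp only [List.foldl_cons]
    obtain ⟨hnd', h'⟩ := pv_fold_inner n ((PySem.Dict.ofList si).getD p.1 0) p.2 dA dB hnd h
    exact ih _ _ hnd' h'

-- ===== VERDICT (by name: the statement is the Claim_ definition above) =====
theorem map_image_to_supercategories_spec : Claim_equal_map_image_to_supercategories := by
  intro supercategories supercategory_to_img supercategory_ids _ _
  unfold Spec_map_image_to_supercategories map_image_to_supercategories map_image_to_supercategories_alt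
  exact (pv_fold_outer supercategories.length supercategory_ids supercategory_to_img
    PySem.Dict.empty PySem.Dict.empty (by simp [PySem.Dict.keys, PySem.Dict.empty]) (by simp [PySem.Dict.empty])).2
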